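-- pv_equiv track=rewrite | github.com/photographyadam-lang/tsm | tsm/commands/repair.py | _repair_completed_content
-- ===== SOURCE A (Python) =====
-- def _repair_completed_content(
--     content: str, valid_task_ids: set[str]
-- ) -> tuple[str, list[str]]:
--     """Repair TASKS-COMPLETED.md content.
--
--     Returns ``(repaired_content, summary_lines)``.
--
--     Repairs:
--     1. Remove rows where task ID does not exist in TASKS.md.
--     2. Remove phase sections that have no rows after removal.
--     """
--     changes: list[str] = []
--     lines = content.splitlines(keepends=True)
--
--     # ── Repair 1: Remove rows with unknown task IDs ────────────────────
--     new_lines: list[str] = []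
--     removed_rows: list[str] = []
--
--     for line in lines:
--         stripped = line.rstrip("\n\r")
--         # Check if this is a table data row (| ... | ... | ... |)
--         if stripped.startswith("|") and stripped.endswith("|"):
--             parts = [p.strip() for p in stripped.split("|")]
--             # Skip header and separator rows
--             if len(parts) >= 2:
--                 candidate = parts[1]
--                 if candidate and candidate not in (
--                     "Task", "---", ""
--                 ) and not candidate.startswith("-"):
--                     if candidate not in valid_task_ids:
--                         removed_rows.append(candidate)
--                         continue  # skip this row
--
--         new_lines.append(line)
--
--     for tid in removed_rows:
--         changes.append(f"[removed] Remove row with unknown task ID '{tid}'")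
--
--     # ── Repair 2: Remove empty phase sections ──────────────────────────
--     # A phase section is a ## heading followed by only header/separator
--     # rows and blank lines, with no data rows.
--     lines = new_lines
--     result: list[str] = []
--     i = 0
--     n = len(lines)
--
--     while i < n:
--         stripped = lines[i].rstrip("\n\r")
--         if stripped.startswith("## "):
--             # Found a potential phase section
--             section_start = i
--             i += 1
--
--             # Collect the section content
--             section_lines: list[str] = [lines[section_start]]
--             has_data_row = False
--
--             while i < n:
--                 s = lines[i].rstrip("\n\r")
--                 if s.startswith("## "):
--                     break
--                 section_lines.append(lines[i])
--                 # Check if this line is a data row (not header/separator)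
--                 if s.startswith("|") and s.endswith("|"):
--                     parts = [p.strip() for p in s.split("|")]
--                     if len(parts) >= 2 and parts[1] not in (
--                         "Task", "---", ""
--                     ) and not parts[1].startswith("-"):
--                         has_data_row = True
--                 i += 1
--
--             if has_data_row:
--                 result.extend(section_lines)
--             else:
--                 # Empty phase section — remove it
--                 phase_name = stripped[3:].strip()
--                 changes.append(
--                     f"[removed] Remove empty phase section "
--                     f"'{phase_name}'"
--                 )
--         else:
--             result.append(lines[i])
--             i += 1
--
--     repaired = "".join(result)
--
--     if not changes:
--         return content, []
--
--     return repaired, changes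
-- ===== SOURCE B (Python) =====
-- def _repair_completed_content(
--     content: str, valid_task_ids: set[str]
-- ) -> tuple[str, list[str]]:
--     """Single streaming pass: buffer the current phase section, flush it when a
--     new '## ' heading (or EOF) arrives, and classify each line once."""
--
--     def data_row_id(line):
--         s = line.rstrip("\n\r")
--         if s.startswith("|") and s.endswith("|"):
--             parts = [p.strip() for p in s.split("|")]
--             if len(parts) >= 2:
--                 c = parts[1]
--                 if c not in ("Task", "---", "") and not c.startswith("-"):
--                     return c
--         return None
--
--     out: list[str] = []            # lines emitted outside / from flushed sections
--     removed: list[str] = []        # unknown task IDs, in order of appearance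
--     empty_sections: list[str] = [] # empty-phase messages, in order of appearance
--     buf: list[str] | None = None   # current section's lines (None before 1st heading)
--     buf_has_data = False
--     buf_name = ""
--
--     def flush():
--         nonlocal buf
--         if buf is not None:
--             if buf_has_data:
--                 out.extend(buf)
--             else:
--                 empty_sections.append(
--                     f"[removed] Remove empty phase section '{buf_name}'"
--                 )
--             buf = None
--
--     for line in content.splitlines(keepends=True):
--         s = line.rstrip("\n\r")
--         if s.startswith("## "):
--             flush()
--             buf = [line]
--             buf_has_data = False
--             buf_name = s[3:].strip()
--             continue
--         cid = data_row_id(line)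
--         if cid is not None and cid not in valid_task_ids:
--             removed.append(cid)
--             continue
--         if buf is None:
--             out.append(line)
--         else:
--             buf.append(line)
--             if cid is not None:
--                 buf_has_data = True
--     flush()
--
--     changes = [
--         f"[removed] Remove row with unknown task ID '{tid}'" for tid in removed
--     ] + empty_sections
--     if not changes:
--         return content, []
--     return "".join(out), changes
-- ===== Notes on version B (the rewrite author's own statement) =====
-- stated objective: alternative
-- what changed: Replaces A's two sequential passes (first filter out unknown-ID rows into an intermediate line list, then an index-driven while loop re-scanning it for empty phase sections) with a single streaming pass that classifies each line once and keeps a current-section buffer flushed at each '## ' heading or EOF, collecting removed-row and empty-section messages in two lists concatenated at the end.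
import Mathlib
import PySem

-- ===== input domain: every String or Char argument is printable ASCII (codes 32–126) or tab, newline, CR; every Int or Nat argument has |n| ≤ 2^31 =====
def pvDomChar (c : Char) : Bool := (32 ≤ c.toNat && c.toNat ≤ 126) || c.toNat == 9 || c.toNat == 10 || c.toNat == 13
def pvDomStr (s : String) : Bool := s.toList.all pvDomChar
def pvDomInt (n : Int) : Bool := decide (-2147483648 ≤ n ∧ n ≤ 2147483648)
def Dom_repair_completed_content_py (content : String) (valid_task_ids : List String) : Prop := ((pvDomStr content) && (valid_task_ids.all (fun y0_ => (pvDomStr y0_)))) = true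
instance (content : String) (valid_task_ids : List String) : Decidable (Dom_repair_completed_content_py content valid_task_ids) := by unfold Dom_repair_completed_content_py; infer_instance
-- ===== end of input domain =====

-- B replaces A's two sequential passes (filter rows, then re-scan for empty sections) with one
-- streaming pass keeping a current-section buffer; same return value (alternative decomposition).

-- shared low-level helpers (ports of the same stdlib calls / f-strings both Pythons make)
-- exact port of line.rstrip("\n\r") (strip '\n'/'\r' from the right)
def rstripNL (s : List Char) : List Char :=
  (s.reverse.dropWhile (fun c => c == '\n' || c == '\r')).reverse

-- exact port of str.splitlines(keepends=True) on the admitted ASCII domain,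
-- where the only line breaks are '\n', '\r' and '\r\n'
def splitKeepGo : List Char → List Char → List (List Char)
  | [], acc => if acc.isEmpty then [] else [acc.reverse]
  | '\n' :: rest, acc => (acc.reverse ++ ['\n']) :: splitKeepGo rest []
  | '\r' :: '\n' :: rest, acc => (acc.reverse ++ ['\r', '\n']) :: splitKeepGo rest []
  | '\r' :: rest, acc => (acc.reverse ++ ['\r']) :: splitKeepGo rest []
  | c :: rest, acc => splitKeepGo rest (c :: acc)

def msgRow (tid : List Char) : String :=
  String.ofList ("[removed] Remove row with unknown task ID '".toList ++ tid ++ ['\''])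

def msgEmpty (name : List Char) : String :=
  String.ofList ("[removed] Remove empty phase section '".toList ++ name ++ ['\''])

-- ===== PORT A =====
-- Repair 1: the first for-loop (filter unknown-ID rows); returns (new_lines, removed_rows)
def aPass1 (V : List (List Char)) : List (List Char) → List (List Char) × List (List Char)
  | [] => ([], [])
  | line :: rest =>
    let stripped := rstripNL line
    let r := aPass1 V rest
    if PySem.Chars.startswith stripped ['|'] && PySem.Chars.endswith stripped ['|'] then
      let parts := (PySem.Chars.splitOn stripped ['|']).map PySem.Chars.strip
      if 2 ≤ parts.length then
        let candidate := parts.getD 1 []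
        if !candidate.isEmpty
            && !(candidate == "Task".toList || candidate == "---".toList || candidate == [])
            && !PySem.Chars.startswith candidate ['-'] then
          if !V.contains candidate then (r.1, candidate :: r.2)
          else (line :: r.1, r.2)
        else (line :: r.1, r.2)
      else (line :: r.1, r.2)
    else (line :: r.1, r.2)

-- the inner while-loop of Repair 2: collect section lines until the next '## ' heading;
-- returns (section_lines after the heading, remaining lines, has_data_row)
def collectSection : List (List Char) → List (List Char) × List (List Char) × Bool
  | [] => ([], [], false)
  | l :: rest =>
    let s := rstripNL l
    if PySem.Chars.startswith s "## ".toList then ([], l :: rest, false)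
    else
      let t := collectSection rest
      let isData :=
        if PySem.Chars.startswith s ['|'] && PySem.Chars.endswith s ['|'] then
          let parts := (PySem.Chars.splitOn s ['|']).map PySem.Chars.strip
          if 2 ≤ parts.length then
            (!(parts.getD 1 [] == "Task".toList || parts.getD 1 [] == "---".toList
                || parts.getD 1 [] == []))
              && !PySem.Chars.startswith (parts.getD 1 []) ['-']
          else false
        else false
      (l :: t.1, t.2.1, isData || t.2.2)

-- needed by aPass2's termination (the port cites it in decreasing_by)
theorem collectSection_after_le (ls : List (List Char)) :
    (collectSection ls).2.1.length ≤ ls.length := by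
  induction ls with
  | nil => simp [collectSection]
  | cons l rest ih =>
    simp only [collectSection]
    split
    · simp
    · simpa using Nat.le_succ_of_le ih

-- Repair 2: the outer while-loop; returns (result, empty-section messages)
def aPass2 : List (List Char) → List (List Char) × List String
  | [] => ([], [])
  | l :: rest =>
    let s := rstripNL l
    if PySem.Chars.startswith s "## ".toList then
      let t := collectSection rest
      let r := aPass2 t.2.1
      if t.2.2 then ((l :: t.1) ++ r.1, r.2)
      else (r.1, msgEmpty (PySem.Chars.strip (s.drop 3)) :: r.2)   -- stripped[3:].strip(); drop 3 = the slice, exact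
    else
      let r := aPass2 rest
      (l :: r.1, r.2)
  termination_by ls => ls.length
  decreasing_by
  · have := collectSection_after_le rest; simp; omega
  · simp

def repair_completed_content_py (content : String) (valid_task_ids : List String) : String × List String :=
  let lines := splitKeepGo content.toList []
  let p1 := aPass1 (valid_task_ids.map String.toList) lines
  let changes1 := p1.2.map msgRow
  let p2 := aPass2 p1.1
  let changes := changes1 ++ p2.2
  if changes.isEmpty then (content, [])
  else (String.ofList (PySem.Chars.join [] p2.1), changes)

-- ===== PORT B =====
-- Source B's data_row_id helper
def dataRowId? (s : List Char) : Option (List Char) :=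
  if PySem.Chars.startswith s ['|'] && PySem.Chars.endswith s ['|'] then
    let parts := (PySem.Chars.splitOn s ['|']).map PySem.Chars.strip
    if 2 ≤ parts.length then
      let c := parts.getD 1 []
      if (!(c == "Task".toList || c == "---".toList || c == []))
          && !PySem.Chars.startswith c ['-'] then some c
      else none
    else none
  else none

-- Source B's flush(): buffer is (section lines, has_data, phase name)
def bFlush : Option (List (List Char) × Bool × List Char) → List (List Char) × List String
  | none => ([], [])
  | some (seg, hd, name) => if hd then (seg, []) else ([], [msgEmpty name])

-- Source B's streaming for-loop; returns (out, removed, empty_sections) contributed by `lines`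
def bGo (V : List (List Char)) (buf : Option (List (List Char) × Bool × List Char)) :
    List (List Char) → List (List Char) × List (List Char) × List String
  | [] => ((bFlush buf).1, [], (bFlush buf).2)
  | line :: rest =>
    let s := rstripNL line
    if PySem.Chars.startswith s "## ".toList then
      let f := bFlush buf
      let r := bGo V (some ([line], false, PySem.Chars.strip (s.drop 3))) rest
      (f.1 ++ r.1, r.2.1, f.2 ++ r.2.2)
    else
      match dataRowId? s with
      | some c =>
        if V.contains c then
          match buf with
          | none => let r := bGo V none rest; (line :: r.1, r.2)
          | some (seg, _, name) => bGo V (some (seg ++ [line], true, name)) rest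
        else
          let r := bGo V buf rest
          (r.1, c :: r.2.1, r.2.2)
      | none =>
        match buf with
        | none => let r := bGo V none rest; (line :: r.1, r.2)
        | some (seg, hd, name) => bGo V (some (seg ++ [line], hd, name)) rest

def repair_completed_content_py_alt (content : String) (valid_task_ids : List String) : String × List String :=
  let r := bGo (valid_task_ids.map String.toList) none (splitKeepGo content.toList [])
  let changes := r.2.1.map msgRow ++ r.2.2
  if changes.isEmpty then (content, [])
  else (String.ofList (PySem.Chars.join [] r.1), changes)

-- ===== PRECONDITION & SPEC =====
def Spec_repair_completed_content_py (content : String) (valid_task_ids : List String) (out : String × List String) : Prop := out = repair_completed_content_py_alt content valid_task_ids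
instance (content : String) (valid_task_ids : List String) (out : String × List String) : Decidable (Spec_repair_completed_content_py content valid_task_ids out) := by unfold Spec_repair_completed_content_py; infer_instance

-- ===== CLAIM (what is proved, stated in full; the proofs are below) =====
def Claim_equal_repair_completed_content_py : Prop := ∀ (content : String) (valid_task_ids : List String), Dom_repair_completed_content_py content valid_task_ids → Spec_repair_completed_content_py content valid_task_ids (repair_completed_content_py content valid_task_ids)

-- ===== LEMMAS AND PROOFS =====

theorem heading_toList : "## ".toList = ['#', '#', ' '] := rfl

theorem pipe_false_of_heading {s : List Char}
    (h : PySem.Chars.startswith s "## ".toList = true) :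
    PySem.Chars.startswith s ['|'] = false := by
  cases hb : PySem.Chars.startswith s ['|'] with
  | false => rfl
  | true =>
    rw [PySem.Chars.startswith_iff] at h hb
    rcases h with ⟨t, ht⟩
    rcases hb with ⟨t', ht'⟩
    rw [← ht] at ht'
    simp at ht'

theorem dataRowId?_of_heading {s : List Char}
    (h : PySem.Chars.startswith s "## ".toList = true) :
    dataRowId? s = none := by
  simp [dataRowId?, pipe_false_of_heading h]

theorem aPass1_cons (V : List (List Char)) (l : List Char) (rest : List (List Char)) :
    aPass1 V (l :: rest) =
      match dataRowId? (rstripNL l) with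
      | some c =>
        if V.contains c then (l :: (aPass1 V rest).1, (aPass1 V rest).2)
        else ((aPass1 V rest).1, c :: (aPass1 V rest).2)
      | none => (l :: (aPass1 V rest).1, (aPass1 V rest).2) := by
  simp only [aPass1, dataRowId?]
  split_ifs with h1 h2 h3 h4 h5 <;> simp_all

theorem collectSection_cons_heading {l : List Char} (rest : List (List Char))
    (h : PySem.Chars.startswith (rstripNL l) "## ".toList = true) :
    collectSection (l :: rest) = ([], l :: rest, false) := by
  simp only [collectSection, h, if_true]

theorem collectSection_cons_notHeading {l : List Char} (rest : List (List Char))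
    (h : PySem.Chars.startswith (rstripNL l) "## ".toList = false) :
    collectSection (l :: rest) =
      (l :: (collectSection rest).1, (collectSection rest).2.1,
        (dataRowId? (rstripNL l)).isSome || (collectSection rest).2.2) := by
  simp only [collectSection, dataRowId?, h, Bool.false_eq_true, if_false]
  split_ifs with h1 h2 h3 <;>
    first
      | rfl
      | (refine Prod.ext rfl (Prod.ext rfl ?_)
         simp only [Option.isSome_some, Option.isSome_none, Bool.true_or, Bool.false_or]
         simp_all)

theorem aPass2_cons_heading {l : List Char} (rest : List (List Char))
    (h : PySem.Chars.startswith (rstripNL l) "## ".toList = true) :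
    aPass2 (l :: rest) =
      (if (collectSection rest).2.2 then
        (l :: (collectSection rest).1) ++ (aPass2 (collectSection rest).2.1).1
       else (aPass2 (collectSection rest).2.1).1,
       if (collectSection rest).2.2 then (aPass2 (collectSection rest).2.1).2
       else msgEmpty (PySem.Chars.strip ((rstripNL l).drop 3)) :: (aPass2 (collectSection rest).2.1).2) := by
  rw [aPass2]
  simp only [h, if_true]
  split <;> simp

theorem aPass2_cons_notHeading {l : List Char} (rest : List (List Char))
    (h : PySem.Chars.startswith (rstripNL l) "## ".toList = false) :
    aPass2 (l :: rest) = (l :: (aPass2 rest).1, (aPass2 rest).2) := by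
  have h' : PySem.Chars.startswith (rstripNL l) ['#', '#', ' '] = false := by
    simpa [heading_toList] using h
  rw [aPass2]; simp [heading_toList, h']

-- the streaming loop inside a section equals filter + collect + recurse
theorem bGo_some (V : List (List Char)) (lines : List (List Char)) :
    ∀ seg hd name,
    bGo V (some (seg, hd, name)) lines =
      (let p := aPass1 V lines
       let t := collectSection p.1
       let r := aPass2 t.2.1
       ((if hd || t.2.2 then (seg ++ t.1) ++ r.1 else r.1),
        p.2,
        (if hd || t.2.2 then r.2 else msgEmpty name :: r.2))) := by
  induction lines with
  | nil =>
    intro seg hd name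
    simp only [bGo, aPass1, collectSection, aPass2, bFlush]
    cases hd <;> simp
  | cons l rest ih =>
    intro seg hd name
    by_cases h : PySem.Chars.startswith (rstripNL l) "## ".toList = true
    · rw [bGo]
      simp only [h, if_true]
      rw [ih]
      simp only [aPass1_cons, dataRowId?_of_heading h,
        collectSection_cons_heading _ h, aPass2_cons_heading _ h]
      simp only [bFlush, Bool.false_or, Bool.or_false]
      cases hd <;> cases hcs : (collectSection (aPass1 V rest).1).2.2 <;> simp
    · rw [bGo]
      rw [Bool.not_eq_true] at h
      simp only [h, if_false, Bool.false_eq_true]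
      rcases hid : dataRowId? (rstripNL l) with _ | c
      · simp only [aPass1_cons, hid, collectSection_cons_notHeading _ h, Option.isSome_none,
          Bool.false_or]
        simp [ih, List.append_assoc]
      · by_cases hc : V.contains c = true
        · simp only [hc, if_true]
          simp only [aPass1_cons, hid, hc, if_true, collectSection_cons_notHeading _ h,
            Option.isSome_some, Bool.true_or, Bool.or_true]
          simp [ih, List.append_assoc]
        · rw [Bool.not_eq_true] at hc
          simp only [hc, if_false, Bool.false_eq_true]
          simp only [aPass1_cons, hid, hc, Bool.false_eq_true, if_false]
          simp [ih]

-- the streaming loop before the first heading equals pass2 ∘ pass1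
theorem bGo_none (V : List (List Char)) (lines : List (List Char)) :
    bGo V none lines =
      ((aPass2 (aPass1 V lines).1).1, (aPass1 V lines).2, (aPass2 (aPass1 V lines).1).2) := by
  induction lines with
  | nil => simp [bGo, aPass1, aPass2, bFlush]
  | cons l rest ih =>
    by_cases h : PySem.Chars.startswith (rstripNL l) "## ".toList = true
    · rw [bGo]
      simp only [h, if_true]
      rw [bGo_some]
      simp only [aPass1_cons, dataRowId?_of_heading h, aPass2_cons_heading _ h]
      simp only [bFlush, Bool.false_or]
      cases hcs : (collectSection (aPass1 V rest).1).2.2 <;> simp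
    · rw [bGo]
      rw [Bool.not_eq_true] at h
      simp only [h, if_false, Bool.false_eq_true]
      rcases hid : dataRowId? (rstripNL l) with _ | c
      · rw [ih]
        simp [aPass1_cons, hid, aPass2_cons_notHeading _ h]
      · by_cases hc : V.contains c = true
        · have hc' : c ∈ V := by simpa using hc
          simp only [hc, if_true]
          rw [ih]
          simp [aPass1_cons, hid, hc', aPass2_cons_notHeading _ h]
        · have hc' : c ∉ V := by simpa using hc
          rw [Bool.not_eq_true] at hc
          simp only [hc, Bool.false_eq_true, if_false]
          rw [ih]
          simp [aPass1_cons, hid, hc']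

-- ===== VERDICT (by name: the statement is the Claim_ definition above) =====
theorem repair_completed_content_py_spec : Claim_equal_repair_completed_content_py := by
  intro content valid_task_ids _
  unfold Spec_repair_completed_content_py
  unfold repair_completed_content_py repair_completed_content_py_alt
  rw [bGo_none]
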